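-- pv_equiv track=rewrite | github.com/ferhatelmas/algo | topCoder/srms/300s/srm372/div2/diet_plan.py | chooseDinner
-- ===== SOURCE A (Python) =====
-- def chooseDinner(diet, breakfast, lunch):
--     s, a = set(diet), set()
--     for e in breakfast + lunch:
--         if e not in s or e in a:
--             return 'CHEATER'
--         else:
--             a.add(e)
--     return ''.join(sorted(s-a))
-- ===== SOURCE B (Python) =====
-- def chooseDinner(diet, breakfast, lunch):
--     counts = {}
--     for e in breakfast + lunch:
--         counts[e] = counts.get(e, 0) + 1
--     allowed = set(diet)
--     for k, v in counts.items():
--         if k not in allowed or v > 1: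
--             return 'CHEATER'
--     return ''.join(sorted(allowed - counts.keys()))
-- ===== Notes on version B (the rewrite author's own statement) =====
-- stated objective: idiomatic
-- what changed: Replaces A's single-pass loop with an early return and an incrementally grown accumulator set by first building a frequency table of breakfast+lunch, then scanning the table's items for an item outside the diet or with count > 1, and computing the unused items as set(diet) minus the table's keys.
import Mathlib
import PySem

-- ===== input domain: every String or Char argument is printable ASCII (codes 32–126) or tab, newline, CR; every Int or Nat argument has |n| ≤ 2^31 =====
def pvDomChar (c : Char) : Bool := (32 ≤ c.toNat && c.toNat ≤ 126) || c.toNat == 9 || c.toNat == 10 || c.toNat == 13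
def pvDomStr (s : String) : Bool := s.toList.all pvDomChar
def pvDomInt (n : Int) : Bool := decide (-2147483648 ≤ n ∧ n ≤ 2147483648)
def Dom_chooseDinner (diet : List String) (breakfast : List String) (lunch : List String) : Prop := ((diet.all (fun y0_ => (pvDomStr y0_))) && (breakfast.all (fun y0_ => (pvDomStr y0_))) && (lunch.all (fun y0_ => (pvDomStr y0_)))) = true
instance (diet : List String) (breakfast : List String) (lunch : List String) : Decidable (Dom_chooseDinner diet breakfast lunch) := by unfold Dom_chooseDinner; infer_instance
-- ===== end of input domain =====

-- B replaces A's single-pass early-return accumulator-set loop by building a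
-- frequency table of all eaten items first, then scanning the table (idiomatic).


-- ===== PORT A =====
-- the 'for e in breakfast + lunch' loop with its early return, over the set accumulator a
def chooseDinnerLoop (s : PySem.Set String) (a : PySem.Set String) : List String → String
  | [] => PySem.Str.join "" (PySem.List.sorted (PySem.Set.diff s a) (fun x => x) false)
  | e :: rest =>
      if e ∉ s ∨ e ∈ a then "CHEATER"
      else chooseDinnerLoop s (PySem.Set.add a e) rest

def chooseDinner (diet : List String) (breakfast : List String) (lunch : List String) : String :=
  chooseDinnerLoop (PySem.Set.ofList diet) PySem.Set.empty (breakfast ++ lunch)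

-- ===== PORT B =====
def chooseDinner_alt (diet : List String) (breakfast : List String) (lunch : List String) : String :=
  let counts : PySem.Dict String Int :=
    (breakfast ++ lunch).foldl (fun d e => d.insert e (d.getD e 0 + 1)) PySem.Dict.empty
  let allowed : PySem.Set String := PySem.Set.ofList diet
  -- 'for k, v in counts.items(): if k not in allowed or v > 1: return CHEATER'
  if counts.items.any (fun p => !(PySem.Set.contains allowed p.1) || decide (1 < p.2)) then "CHEATER"
  else PySem.Str.join "" (PySem.List.sorted (PySem.Set.diff allowed (PySem.Dict.keys counts)) (fun x => x) false)

-- ===== PRECONDITION & SPEC =====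
def Spec_chooseDinner (diet : List String) (breakfast : List String) (lunch : List String) (out : String) : Prop := out = chooseDinner_alt diet breakfast lunch
instance (diet : List String) (breakfast : List String) (lunch : List String) (out : String) : Decidable (Spec_chooseDinner diet breakfast lunch out) := by unfold Spec_chooseDinner; infer_instance

-- ===== CLAIM (what is proved, stated in full; the proofs are below) =====
def Claim_equal_chooseDinner : Prop := ∀ (diet : List String) (breakfast : List String) (lunch : List String), Dom_chooseDinner diet breakfast lunch → Spec_chooseDinner diet breakfast lunch (chooseDinner diet breakfast lunch)

-- ===== LEMMAS AND PROOFS =====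

-- characterisation of A's loop
theorem chooseDinnerLoop_eq (s : PySem.Set String) (a : PySem.Set String) (es : List String) :
    chooseDinnerLoop s a es =
      if (∀ e ∈ es, e ∈ s) ∧ es.Nodup ∧ (∀ e ∈ es, e ∉ a) then
        PySem.Str.join "" (PySem.List.sorted (PySem.Set.diff s (PySem.Set.update a es)) (fun x => x) false)
      else "CHEATER" := by
  induction es generalizing a with
  | nil => simp [chooseDinnerLoop, PySem.Set.update]
  | cons e rest ih =>
    by_cases hbad : e ∉ s ∨ e ∈ a
    · rw [chooseDinnerLoop, if_pos hbad, if_neg]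
      rintro ⟨hs, _, ha⟩
      rcases hbad with h | h
      · exact h (hs e (by simp))
      · exact ha e (by simp) h
    · push Not at hbad
      obtain ⟨hes, hea⟩ := hbad
      rw [chooseDinnerLoop, if_neg (by simp [hes, hea]), ih, PySem.Set.update_cons]
      have hiff : ((∀ x ∈ rest, x ∈ s) ∧ rest.Nodup ∧ (∀ x ∈ rest, x ∉ PySem.Set.add a e)) ↔
          ((∀ x ∈ e :: rest, x ∈ s) ∧ (e :: rest).Nodup ∧ (∀ x ∈ e :: rest, x ∉ a)) := by
        simp only [List.mem_cons, List.nodup_cons, forall_eq_or_imp]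
        constructor
        · rintro ⟨h1, h2, h3⟩
          refine ⟨⟨hes, h1⟩, ⟨fun hc => h3 e hc ((PySem.Set.mem_add a e e).mpr (Or.inr rfl)), h2⟩,
            hea, fun x hx hxa => h3 x hx ((PySem.Set.mem_add a e x).mpr (Or.inl hxa))⟩
        · rintro ⟨⟨_, h1⟩, ⟨hne, h2⟩, _, h3⟩
          refine ⟨h1, h2, fun x hx hxa => ?_⟩
          rcases (PySem.Set.mem_add a e x).mp hxa with h | h
          · exact h3 x hx h
          · exact hne (h ▸ hx)
      exact if_congr hiff rfl rfl

-- B's cheater test over the Counter items: 'some eaten item missing from s or repeated'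
theorem alt_any_eq (s : PySem.Set String) (es : List String) :
    ((PySem.Dict.counter es).items.any (fun p => !(PySem.Set.contains s p.1) || decide (1 < p.2))) =
      !decide ((∀ e ∈ es, e ∈ s) ∧ es.Nodup) := by
  rw [PySem.Dict.items_counter, List.any_map]
  by_cases h : (∀ e ∈ es, e ∈ s) ∧ es.Nodup
  · rw [decide_eq_true h, Bool.not_true]
    apply List.any_eq_false.mpr
    rintro k hk
    have hk' : k ∈ es := (PySem.Set.mem_ofList es k).mp hk
    have hc : es.count k ≤ 1 := List.nodup_iff_count_le_one.mp h.2 k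
    have hlt : ¬ (1 < ((es.count k : Nat) : Int)) := by exact_mod_cast Nat.not_lt.mpr hc
    simp [Function.comp, hlt]
    exact h.1 k hk'
  · rw [decide_eq_false h, Bool.not_false]
    apply List.any_eq_true.mpr
    rw [Decidable.not_and_iff_or_not] at h
    rcases h with h | h
    · push Not at h
      obtain ⟨k, hk, hks⟩ := h
      refine ⟨k, (PySem.Set.mem_ofList es k).mpr hk, ?_⟩
      simp [Function.comp]
      exact Or.inl hks
    · rw [List.nodup_iff_count_le_one] at h
      push Not at h
      obtain ⟨k, hk⟩ := h
      have hkes : k ∈ es := List.count_pos_iff.mp (by omega)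
      have hlt : (1:Int) < ((es.count k : Nat) : Int) := by exact_mod_cast hk
      exact ⟨k, (PySem.Set.mem_ofList es k).mpr hkes, by simp [Function.comp, hlt]⟩

-- ===== VERDICT (by name: the statement is the Claim_ definition above) =====
theorem chooseDinner_spec : Claim_equal_chooseDinner := by
  intro diet breakfast lunch _
  unfold Spec_chooseDinner
  simp only [chooseDinner, chooseDinner_alt]
  rw [PySem.Dict.foldl_insert_getD_add_one_eq_counter, chooseDinnerLoop_eq, alt_any_eq,
    PySem.Dict.keys_counter]
  by_cases h : (∀ e ∈ breakfast ++ lunch, e ∈ PySem.Set.ofList diet) ∧ (breakfast ++ lunch).Nodup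
  · rw [decide_eq_true h]
    simp only [Bool.not_true, Bool.false_eq_true, if_false]
    rw [if_pos ⟨h.1, h.2, fun e _ hc => List.not_mem_nil hc⟩, PySem.Set.update_empty]
  · rw [decide_eq_false h]
    simp only [Bool.not_false, if_true]
    rw [if_neg]
    rintro ⟨h1, h2, _⟩
    exact h ⟨h1, h2⟩
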